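-- pv_equiv track=rewrite | github.com/safelibs/validator | tools/render_site.py | _port_counts
-- ===== SOURCE A (Python) =====
-- from typing import Any
--
-- def _port_counts(rows: list[dict[str, Any]]) -> dict[str, int]:
--     port_rows = [row for row in rows if row["mode"] == "port-04-test"]
--     by_library: dict[str, list[dict[str, Any]]] = {}
--     for row in port_rows:
--         by_library.setdefault(str(row["library"]), []).append(row)
--     passed = sum(1 for row in port_rows if row["status"] == "passed")
--     return {
--         "cases": len(port_rows),
--         "passed": passed,
--         "failed": len(port_rows) - passed,
--         "libraries": len(by_library),
--         "passing_libraries": sum(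
--             1
--             for library_rows in by_library.values()
--             if library_rows and all(row["status"] == "passed" for row in library_rows)
--         ),
--     }
-- ===== SOURCE B (Python) =====
-- def _port_counts(rows: list) -> dict:
--     cases = 0
--     passed = 0
--     per_lib: dict[str, bool] = {}
--     for row in rows:
--         if row["mode"] != "port-04-test":
--             continue
--         lib = str(row["library"])
--         ok = row["status"] == "passed"
--         cases += 1
--         if ok:
--             passed += 1
--         per_lib[lib] = per_lib.get(lib, True) and ok
--     return {
--         "cases": cases,
--         "passed": passed,
--         "failed": cases - passed,
--         "libraries": len(per_lib),
--         "passing_libraries": sum(1 for v in per_lib.values() if v),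
--     }
-- ===== Notes on version B (the rewrite author's own statement) =====
-- stated objective: simpler
-- what changed: Single pass over rows maintaining counters and a per-library all-passed boolean dict, instead of building a filtered list, grouping rows into per-library lists and re-scanning each group with all().
import Mathlib
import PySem

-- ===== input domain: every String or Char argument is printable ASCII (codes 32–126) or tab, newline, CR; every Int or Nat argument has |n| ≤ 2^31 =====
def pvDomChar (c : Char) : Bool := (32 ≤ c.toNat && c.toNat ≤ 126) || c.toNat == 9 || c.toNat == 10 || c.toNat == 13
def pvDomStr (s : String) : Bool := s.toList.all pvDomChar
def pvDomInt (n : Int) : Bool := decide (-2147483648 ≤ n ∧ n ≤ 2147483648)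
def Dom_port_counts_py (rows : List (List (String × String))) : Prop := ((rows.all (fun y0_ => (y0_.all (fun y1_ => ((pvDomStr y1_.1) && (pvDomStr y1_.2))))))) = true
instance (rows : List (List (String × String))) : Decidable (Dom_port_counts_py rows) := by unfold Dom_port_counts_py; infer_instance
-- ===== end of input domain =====

-- B replaces A's filter + group-into-lists + per-group all() re-scan by one pass with counters
-- and a per-library all-passed Bool dict (objective: simpler).

-- row["k"] for a row given as an association list, with Python dict semantics (later pair overwrites);
-- the "" default is only reached outside Pre_ (where Python raises KeyError).
def pvGet (r : List (String × String)) (k : String) : String :=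
  (PySem.Dict.ofList r).getD k ""

-- ===== PORT A =====
def port_counts_py (rows : List (List (String × String))) : List (String × Int) :=
  let port_rows := rows.filter (fun r => pvGet r "mode" == "port-04-test")
  let by_library := port_rows.foldl
    (fun d r => d.modify (pvGet r "library") [] (· ++ [r]))
    (PySem.Dict.empty : PySem.Dict String (List (List (String × String))))
  let passed := (port_rows.map (fun r => if pvGet r "status" == "passed" then (1 : Int) else 0)).sum
  [("cases", (port_rows.length : Int)),
   ("passed", passed),
   ("failed", (port_rows.length : Int) - passed),
   ("libraries", (by_library.size : Int)),
   ("passing_libraries",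
     (by_library.values.map (fun g =>
        if (!g.isEmpty) && g.all (fun r => pvGet r "status" == "passed") then (1 : Int) else 0)).sum)]

-- ===== PORT B =====
def port_counts_py_alt (rows : List (List (String × String))) : List (String × Int) :=
  let st := rows.foldl
    (fun (st : Int × Int × PySem.Dict String Bool) r =>
      if pvGet r "mode" == "port-04-test" then
        let lib := pvGet r "library"
        let ok := pvGet r "status" == "passed"
        (st.1 + 1, (if ok then st.2.1 + 1 else st.2.1), st.2.2.insert lib (st.2.2.getD lib true && ok))
      else st)
    ((0 : Int), (0 : Int), (PySem.Dict.empty : PySem.Dict String Bool))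
  [("cases", st.1),
   ("passed", st.2.1),
   ("failed", st.1 - st.2.1),
   ("libraries", (st.2.2.size : Int)),
   ("passing_libraries", (st.2.2.values.map (fun b => if b then (1 : Int) else 0)).sum)]

-- ===== PRECONDITION & SPEC =====
-- Pre_: every row has key "mode", and every row in port-04-test mode also has "library" and "status";
-- on any other input the Python A (and B) raises KeyError and returns nothing.
def Pre_port_counts_py (rows : List (List (String × String))) : Prop :=
  (rows.all (fun r =>
    (PySem.Dict.ofList r).contains "mode" &&
    (!(pvGet r "mode" == "port-04-test") ||
      ((PySem.Dict.ofList r).contains "library" && (PySem.Dict.ofList r).contains "status")))) = true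
instance (rows : List (List (String × String))) : Decidable (Pre_port_counts_py rows) := by unfold Pre_port_counts_py; infer_instance

def pvWitness_port_counts_py : (List (List (String × String))) :=
  [[("mode", "port-04-test"), ("library", "libA"), ("status", "passed")],
   [("mode", "other")],
   [("mode", "port-04-test"), ("library", "libA"), ("status", "failed")]]

def Spec_port_counts_py (rows : List (List (String × String))) (out : List (String × Int)) : Prop := out = port_counts_py_alt rows
instance (rows : List (List (String × String))) (out : List (String × Int)) : Decidable (Spec_port_counts_py rows out) := by unfold Spec_port_counts_py; infer_instance

-- ===== CLAIM (what is proved, stated in full; the proofs are below) =====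
def Claim_equal_port_counts_py : Prop := ∀ (rows : List (List (String × String))), Dom_port_counts_py rows → Pre_port_counts_py rows → Spec_port_counts_py rows (port_counts_py rows)

-- ===== LEMMAS AND PROOFS =====

-- abbreviations used only by the proofs
def pvOk (r : List (String × String)) : Bool := pvGet r "status" == "passed"
def pvLib (r : List (String × String)) : String := pvGet r "library"
def pvStepA (d : PySem.Dict String (List (List (String × String)))) (r : List (String × String)) :
    PySem.Dict String (List (List (String × String))) :=
  d.modify (pvLib r) [] (· ++ [r])
def pvStepB (st : Int × Int × PySem.Dict String Bool) (r : List (String × String)) :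
    Int × Int × PySem.Dict String Bool :=
  (st.1 + 1, (if pvOk r then st.2.1 + 1 else st.2.1),
   st.2.2.insert (pvLib r) (st.2.2.getD (pvLib r) true && pvOk r))

-- the loop invariant relating B's single-pass state to A's grouping dict, over the filtered rows
theorem pv_inv (l : List (List (String × String))) :
    ∀ (c p : Int) (dA : PySem.Dict String (List (List (String × String)))) (dB : PySem.Dict String Bool),
    dB.keys = dA.keys → dA.keys.Nodup →
    (∀ k, dB.getD k true = (dA.getD k []).all pvOk) →
    (∀ k ∈ dA.keys, dA.getD k [] ≠ []) →
    (l.foldl pvStepB (c, p, dB)).1 = c + l.length ∧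
    (l.foldl pvStepB (c, p, dB)).2.1
      = p + (l.map (fun r => if pvOk r then (1 : Int) else 0)).sum ∧
    (l.foldl pvStepB (c, p, dB)).2.2.keys = (l.foldl pvStepA dA).keys ∧
    (l.foldl pvStepA dA).keys.Nodup ∧
    (∀ k, (l.foldl pvStepB (c, p, dB)).2.2.getD k true = ((l.foldl pvStepA dA).getD k []).all pvOk) ∧
    (∀ k ∈ (l.foldl pvStepA dA).keys, (l.foldl pvStepA dA).getD k [] ≠ []) := by
  induction l with
  | nil =>
    intro c p dA dB hk hnd hv hne
    simpa using ⟨hk, hnd, hv, hne⟩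
  | cons r t ih =>
    intro c p dA dB hk hnd hv hne
    have hcont : dB.contains (pvLib r) = dA.contains (pvLib r) := by
      rw [PySem.Dict.contains_eq_decide_mem_keys, PySem.Dict.contains_eq_decide_mem_keys, hk]
    have hkeysA : (pvStepA dA r).keys
        = (dA.insert (pvLib r) ((dA.getD (pvLib r) []) ++ [r])).keys := by
      simp [pvStepA, PySem.Dict.keys_modify]
    have hk' : (dB.insert (pvLib r) (dB.getD (pvLib r) true && pvOk r)).keys = (pvStepA dA r).keys := by
      rw [hkeysA]
      by_cases hc : dA.contains (pvLib r) = true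
      · rw [PySem.Dict.keys_insert_of_contains _ _ (hcont.trans hc),
            PySem.Dict.keys_insert_of_contains _ _ hc, hk]
      · have hc' : dA.contains (pvLib r) = false := by simpa using hc
        rw [PySem.Dict.keys_insert_of_not_contains _ _ (hcont.trans hc'),
            PySem.Dict.keys_insert_of_not_contains _ _ hc', hk]
    have hndA' : (pvStepA dA r).keys.Nodup := by
      rw [hkeysA]; exact PySem.Dict.nodup_keys_insert _ _ _ hnd
    have hv' : ∀ k, (dB.insert (pvLib r) (dB.getD (pvLib r) true && pvOk r)).getD k true
        = ((pvStepA dA r).getD k []).all pvOk := by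
      intro k
      rw [PySem.Dict.getD_insert]
      simp only [pvStepA, PySem.Dict.getD_modify]
      by_cases hkk : k = pvLib r
      · simp [hkk, hv (pvLib r), List.all_append, pvOk]
      · simp [hkk, hv k]
    have hne' : ∀ k ∈ (pvStepA dA r).keys, (pvStepA dA r).getD k [] ≠ [] := by
      intro k hkmem
      simp only [pvStepA, PySem.Dict.getD_modify]
      by_cases hkk : k = pvLib r
      · simp [hkk]
      · simp only [if_neg hkk]
        apply hne
        rw [hkeysA] at hkmem
        rcases (PySem.Dict.mem_keys_insert _ _ _ _).mp hkmem with h | h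
        · exact absurd h hkk
        · exact h
    have := ih (c + 1) (if pvOk r then p + 1 else p) (pvStepA dA r)
        (dB.insert (pvLib r) (dB.getD (pvLib r) true && pvOk r)) hk' hndA' hv' hne'
    simp only [List.foldl_cons]
    refine ⟨?_, ?_, this.2.2⟩
    · rw [show List.foldl pvStepB (pvStepB (c, p, dB) r) t
          = List.foldl pvStepB ((c + 1, (if pvOk r then p + 1 else p),
            dB.insert (pvLib r) (dB.getD (pvLib r) true && pvOk r))) t from rfl]
      rw [this.1]; simp [List.length_cons]; ring
    · rw [show List.foldl pvStepB (pvStepB (c, p, dB) r) t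
          = List.foldl pvStepB ((c + 1, (if pvOk r then p + 1 else p),
            dB.insert (pvLib r) (dB.getD (pvLib r) true && pvOk r))) t from rfl]
      rw [this.2.1]
      by_cases h : pvOk r = true <;> simp [h] <;> ring_nf

theorem pv_size_eq_keys_length {κ ν : Type} [BEq κ] (d : PySem.Dict κ ν) : d.size = d.keys.length := by
  simp [PySem.Dict.size, PySem.Dict.keys]

-- ===== VERDICT (by name: the statement is the Claim_ definition above) =====
theorem port_counts_py_spec : Claim_equal_port_counts_py := by
  intro rows _ _
  unfold Spec_port_counts_py port_counts_py port_counts_py_alt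
  have hfold : rows.foldl
      (fun (st : Int × Int × PySem.Dict String Bool) r =>
        if pvGet r "mode" == "port-04-test" then
          (st.1 + 1, (if pvGet r "status" == "passed" then st.2.1 + 1 else st.2.1),
           st.2.2.insert (pvGet r "library") (st.2.2.getD (pvGet r "library") true && (pvGet r "status" == "passed")))
        else st)
      ((0 : Int), (0 : Int), (PySem.Dict.empty : PySem.Dict String Bool))
      = (rows.filter (fun r => pvGet r "mode" == "port-04-test")).foldl pvStepB
        ((0 : Int), (0 : Int), (PySem.Dict.empty : PySem.Dict String Bool)) := by
    rw [List.foldl_filter]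
    rfl
  simp only [hfold]
  set l := rows.filter (fun r => pvGet r "mode" == "port-04-test") with hl
  have main := pv_inv l 0 0 PySem.Dict.empty PySem.Dict.empty
    (by simp) (by simp) (by intro k; simp) (by intro k hk; simp at hk)
  obtain ⟨h1, h2, h3, h4, h5, h6⟩ := main
  have hokrw : (fun r => pvGet r "status" == "passed") = pvOk := rfl
  have hAfold : l.foldl
      (fun d r => d.modify (pvGet r "library") [] (· ++ [r]))
      (PySem.Dict.empty : PySem.Dict String (List (List (String × String))))
      = l.foldl pvStepA PySem.Dict.empty := rfl
  simp only [hAfold, hokrw]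
  have hndB : (l.foldl pvStepB ((0 : Int), (0 : Int), PySem.Dict.empty)).2.2.keys.Nodup := by
    rw [h3]; exact h4
  have hvalsB := PySem.Dict.values_eq_map_keys _ hndB true
  have hvalsA := PySem.Dict.values_eq_map_keys (l.foldl pvStepA PySem.Dict.empty) h4 []
  simp only [List.cons.injEq, Prod.mk.injEq, true_and, and_true]
  refine ⟨?_, ?_, ?_, ?_, ?_⟩
  · rw [h1]; omega
  · rw [h2]; simp only [zero_add]; rfl
  · rw [h1, h2]; simp only [zero_add]; rfl
  · rw [pv_size_eq_keys_length, pv_size_eq_keys_length, h3]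
  · rw [hvalsB, hvalsA, h3, List.map_map, List.map_map]
    congr 1
    apply List.map_congr_left
    intro k hkmem
    simp only [Function.comp]
    simp only [h5 k]
    have hne := h6 k hkmem
    cases hall : ((l.foldl pvStepA PySem.Dict.empty).getD k []).all pvOk
    · simp
    · simp [hne]
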